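-- pv_equiv track=rewrite | github.com/wikimedia/operations-puppet | utils/audit.py | contained_resources
-- ===== SOURCE A (Python) =====
-- def contained_resources(title, class_resources, all_resources):
--     """recursively search class_resources"""
--     if title in all_resources:
--         return all_resources
--     all_resources.add(title)
--     for resource in class_resources.get(title, []):
--         if resource in all_resources:
--             continue
--         all_resources.update(contained_resources(resource, class_resources, all_resources))
--     return all_resources
-- ===== SOURCE B (Python) =====
-- def contained_resources(title, class_resources, all_resources):
--     """iterative DFS with an explicit stack; mutates and returns the same set"""
--     stack = [title]
--     while stack:
--         node = stack.pop()
--         if node in all_resources: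
--             continue
--         all_resources.add(node)
--         stack.extend(reversed(class_resources.get(node, [])))
--     return all_resources
-- ===== Notes on version B (the rewrite author's own statement) =====
-- stated objective: idiomatic
-- what changed: A's recursive DFS (function recursing on each unvisited child, relying on in-place set mutation across frames) is replaced by an iterative DFS with an explicit stack: push the title, pop nodes, skip visited ones, add and push their children; same set returned.
import Mathlib
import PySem

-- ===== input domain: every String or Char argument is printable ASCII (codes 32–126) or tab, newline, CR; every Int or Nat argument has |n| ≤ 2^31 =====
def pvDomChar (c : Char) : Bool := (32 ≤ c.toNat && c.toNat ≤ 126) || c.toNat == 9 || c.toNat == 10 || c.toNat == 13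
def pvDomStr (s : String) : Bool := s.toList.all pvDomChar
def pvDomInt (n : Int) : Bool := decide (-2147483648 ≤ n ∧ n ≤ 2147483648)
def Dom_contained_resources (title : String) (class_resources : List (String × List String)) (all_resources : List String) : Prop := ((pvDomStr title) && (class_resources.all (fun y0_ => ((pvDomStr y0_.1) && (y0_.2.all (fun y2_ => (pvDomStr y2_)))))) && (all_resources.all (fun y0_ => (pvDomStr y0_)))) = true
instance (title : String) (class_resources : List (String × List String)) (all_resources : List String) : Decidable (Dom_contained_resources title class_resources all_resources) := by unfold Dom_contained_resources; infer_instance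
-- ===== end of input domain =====

-- B replaces A's recursion by an iterative DFS over an explicit stack (same return value; like A it
-- conceptually mutates and returns the passed-in set — the equivalence proved here is about the return value).
-- Both Python functions recurse/loop on a set that only grows, so each port carries a fuel argument that
-- merely makes the same computation total; the chosen fuel is proved sufficient (fuel-irrelevance lemmas below).

-- ===== PORT A =====
-- recursive DFS: contained_resources(title, class_resources, all_resources), set modelled as PySem.Set
-- (insertion-order list); `all_resources.update(contained_resources(...))` updates the set with itself
-- (the recursive call mutates all_resources in place), i.e. the threaded set is the recursive result.
mutual
def pvGoA (crs : List (String × List String)) (fuel : Nat) (title : String) (all : List String) : List String :=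
  if PySem.Set.contains all title then all
  else
    match fuel with
    | 0 => all
    | f + 1 => pvLoopA crs f ((PySem.Dict.mk crs).getD title []) (PySem.Set.add all title)
termination_by (fuel, 0)

-- the `for resource in class_resources.get(title, [])` loop of A
def pvLoopA (crs : List (String × List String)) (fuel : Nat) (cs : List String) (all : List String) : List String :=
  match cs with
  | [] => all
  | c :: rest =>
      pvLoopA crs fuel rest (if PySem.Set.contains all c then all else pvGoA crs fuel c all)
termination_by (fuel, cs.length + 1)
end

def contained_resources (title : String) (class_resources : List (String × List String)) (all_resources : List String) : List String :=
  pvGoA class_resources (2 + (class_resources.flatMap Prod.snd).length) title all_resources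

-- ===== PORT B =====
-- iterative DFS; the Lean list models the Python stack with head = top (Python pushes reversed(children)
-- at the end and pops from the end, so the next node popped is the first child: head of children ++ rest).
def pvGoB (crs : List (String × List String)) (fuel : Nat) (stack : List String) (all : List String) : List String :=
  match stack with
  | [] => all
  | node :: rest =>
    if PySem.Set.contains all node then pvGoB crs fuel rest all
    else
      match fuel with
      | 0 => all
      | f + 1 => pvGoB crs f (((PySem.Dict.mk crs).getD node []) ++ rest) (PySem.Set.add all node)
termination_by (fuel, stack.length)

def contained_resources_alt (title : String) (class_resources : List (String × List String)) (all_resources : List String) : List String :=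
  pvGoB class_resources (2 + (class_resources.flatMap Prod.snd).length) [title] all_resources

-- ===== PRECONDITION & SPEC =====
def Spec_contained_resources (title : String) (class_resources : List (String × List String)) (all_resources : List String) (out : List String) : Prop := out = contained_resources_alt title class_resources all_resources
instance (title : String) (class_resources : List (String × List String)) (all_resources : List String) (out : List String) : Decidable (Spec_contained_resources title class_resources all_resources out) := by unfold Spec_contained_resources; infer_instance

-- ===== CLAIM (what is proved, stated in full; the proofs are below) =====
def Claim_equal_contained_resources : Prop := ∀ (title : String) (class_resources : List (String × List String)) (all_resources : List String), Dom_contained_resources title class_resources all_resources → Spec_contained_resources title class_resources all_resources (contained_resources title class_resources all_resources)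

-- ===== LEMMAS AND PROOFS =====

lemma pv_kids_subset (crs : List (String × List String)) (t : String) :
    ∀ c ∈ (PySem.Dict.mk crs).getD t [], c ∈ crs.flatMap Prod.snd := by
  induction crs with
  | nil => simp [PySem.Dict.getD, PySem.Dict.get?]
  | cons p rest ih =>
    intro c hc
    rw [PySem.Dict.getD_eq_get?_getD] at hc
    rcases p with ⟨k, v⟩
    rw [PySem.Dict.get?_mk_cons] at hc
    by_cases h : k == t
    · simp only [h, if_pos] at hc
      simp only [Option.getD_some] at hc
      simp [List.flatMap]
      exact Or.inl hc
    · simp only [h, Bool.false_eq_true, if_false] at hc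
      rw [← PySem.Dict.getD_eq_get?_getD] at hc
      have := ih c hc
      simp [List.flatMap] at this ⊢
      exact Or.inr this
lemma pv_filter_len_mono {α : Type} (l : List α) (p q : α → Bool)
    (h : ∀ x ∈ l, q x = true → p x = true) :
    (l.filter q).length ≤ (l.filter p).length := by
  induction l with
  | nil => simp
  | cons a l ih =>
    have ih' := ih (fun x hx => h x (List.mem_cons_of_mem a hx))
    by_cases hq : q a = true
    · have hp := h a (List.mem_cons_self) hq
      simp [hq, hp]; omega
    · simp only [List.filter_cons]
      by_cases hp : p a = true <;> simp [hq, hp] <;> omega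
lemma pv_filter_len_strict {α : Type} (l : List α) (p q : α → Bool) (t : α)
    (ht : t ∈ l) (hpt : p t = true) (hqt : q t = false)
    (h : ∀ x ∈ l, q x = true → p x = true) :
    (l.filter q).length < (l.filter p).length := by
  induction l with
  | nil => simp at ht
  | cons a l ih =>
    have hmono := pv_filter_len_mono l p q (fun x hx => h x (List.mem_cons_of_mem a hx))
    rcases List.mem_cons.mp ht with rfl | hta
    · simp [hpt, hqt]; omega
    · have := ih hta (fun x hx => h x (List.mem_cons_of_mem a hx))
      simp only [List.filter_cons]
      by_cases hq : q a = true
      · have hp := h a List.mem_cons_self hq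
        simp [hq, hp]; omega
      · by_cases hp : p a = true <;> simp [hq, hp] <;> omega

def pvUniv (crs : List (String × List String)) : List String := crs.flatMap Prod.snd
def pvPot (crs : List (String × List String)) (all : List String) : Nat :=
  ((pvUniv crs).filter (fun s => !(all.contains s))).length

lemma pv_pot_mono (crs : List (String × List String)) (all all' : List String)
    (h : ∀ x ∈ all, x ∈ all') : pvPot crs all' ≤ pvPot crs all := by
  apply pv_filter_len_mono
  intro x _ hq
  simp at hq ⊢
  intro hx; exact hq (h x hx)

lemma pv_pot_strict (crs : List (String × List String)) (all : List String) (t : String)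
    (htU : t ∈ pvUniv crs) (htall : t ∉ all) : pvPot crs (all ++ [t]) < pvPot crs all := by
  apply pv_filter_len_strict _ _ _ t htU
  · simpa using htall
  · simp
  · intro x _ hq; simp at hq ⊢; exact hq.1

lemma pv_pot_le (crs : List (String × List String)) (all : List String) :
    pvPot crs all ≤ (pvUniv crs).length :=
  List.length_filter_le _ _

lemma pv_goA_mem_all (crs : List (String × List String)) (fuel : Nat) (t : String)
    (all : List String) (h : t ∈ all) : pvGoA crs fuel t all = all := by
  rw [pvGoA.eq_def]
  have hc : PySem.Set.contains all t = true := (PySem.Set.contains_iff (s := all) (x := t)).mpr h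
  simp only [hc, if_true]

lemma pv_memA (crs : List (String × List String)) (fuel : Nat) :
    (∀ t all, ∀ x ∈ all, x ∈ pvGoA crs fuel t all) ∧
    (∀ cs all, ∀ x ∈ all, x ∈ pvLoopA crs fuel cs all) := by
  induction fuel with
  | zero =>
    constructor
    · intro t all x hx
      rw [pvGoA]; split <;> simp [hx]
    · intro cs all x hx
      induction cs generalizing all with
      | nil => rw [pvLoopA]; exact hx
      | cons c rest ih =>
        rw [pvLoopA]
        apply ih
        split
        · exact hx
        · rw [pvGoA]; split <;> simp [hx]
  | succ f ih =>
    have hA : ∀ t all, ∀ x ∈ all, x ∈ pvGoA crs (f+1) t all := by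
      intro t all x hx
      rw [pvGoA]
      split
      · exact hx
      · exact ih.2 _ _ x (by simp [PySem.Set.add_eq_ite]; split <;> simp [hx])
    refine ⟨hA, ?_⟩
    intro cs all x hx
    induction cs generalizing all with
    | nil => rw [pvLoopA]; exact hx
    | cons c rest ihc =>
      rw [pvLoopA]
      apply ihc
      split
      · exact hx
      · exact hA _ _ x hx

lemma pv_contains_false (all : List String) (t : String) (h : t ∉ all) :
    PySem.Set.contains all t = false := by
  cases hb : PySem.Set.contains all t
  · rfl
  · exact absurd ((PySem.Set.contains_iff (s := all) (x := t)).mp hb) h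

lemma pv_goA_not_mem (crs : List (String × List String)) (f : Nat) (t : String)
    (all : List String) (h : t ∉ all) :
    pvGoA crs (f + 1) t all = pvLoopA crs f ((PySem.Dict.mk crs).getD t []) (all ++ [t]) := by
  rw [pvGoA.eq_def]
  simp only [pv_contains_false all t h, Bool.false_eq_true, if_false,
    PySem.Set.add_of_not_mem h]

lemma pv_loopA_nil (crs : List (String × List String)) (f : Nat) (all : List String) :
    pvLoopA crs f [] all = all := by rw [pvLoopA]

lemma pv_loopA_cons (crs : List (String × List String)) (f : Nat) (c : String)
    (rest : List String) (all : List String) :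
    pvLoopA crs f (c :: rest) all
      = pvLoopA crs f rest (if c ∈ all then all else pvGoA crs f c all) := by
  rw [pvLoopA]
  by_cases hm : c ∈ all
  · simp only [(PySem.Set.contains_iff (s := all) (x := c)).mpr hm, if_true, if_pos hm]
  · simp only [pv_contains_false all c hm, Bool.false_eq_true, if_false, if_neg hm]

lemma pv_pot_pos (crs : List (String × List String)) (all : List String) (t : String)
    (htU : t ∈ pvUniv crs) (htall : t ∉ all) : 1 ≤ pvPot crs all := by
  have : t ∈ (pvUniv crs).filter (fun s => !(all.contains s)) :=
    List.mem_filter.mpr ⟨htU, by simpa using htall⟩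
  exact List.length_pos_of_mem this

lemma pv_pot_zero_mem (crs : List (String × List String)) (all : List String) (c : String)
    (h : pvPot crs all = 0) (hcU : c ∈ pvUniv crs) : c ∈ all := by
  by_contra hc
  exact absurd h (by have := pv_pot_pos crs all c hcU hc; omega)

def pvDA (crs : List (String × List String)) (t : String) (all : List String) : Nat :=
  if t ∈ pvUniv crs ∧ t ∉ all then 0 else 1

lemma pv_stepA (crs : List (String × List String)) (fuel : Nat) :
    (∀ t all, pvPot crs all + pvDA crs t all ≤ fuel →
        pvGoA crs fuel t all = pvGoA crs (fuel + 1) t all) ∧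
    (∀ cs all, (∀ c ∈ cs, c ∈ pvUniv crs) → pvPot crs all ≤ fuel →
        pvLoopA crs fuel cs all = pvLoopA crs (fuel + 1) cs all) := by
  induction fuel with
  | zero =>
    constructor
    · intro t all h
      by_cases hm : t ∈ all
      · rw [pv_goA_mem_all _ _ _ _ hm, pv_goA_mem_all _ _ _ _ hm]
      · exfalso
        unfold pvDA at h
        by_cases htU : t ∈ pvUniv crs
        · have := pv_pot_pos crs all t htU hm
          simp [htU, hm] at h; omega
        · simp [htU] at h
    · intro cs all hcs h
      induction cs with
      | nil => rw [pv_loopA_nil, pv_loopA_nil]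
      | cons c rest ih =>
        have hc : c ∈ all :=
          pv_pot_zero_mem crs all c (by omega) (hcs c List.mem_cons_self)
        rw [pv_loopA_cons, pv_loopA_cons, if_pos hc, if_pos hc]
        exact ih (fun x hx => hcs x (List.mem_cons_of_mem c hx))
  | succ f ihf =>
    have hSA : ∀ t all, pvPot crs all + pvDA crs t all ≤ f + 1 →
        pvGoA crs (f + 1) t all = pvGoA crs (f + 2) t all := by
      intro t all h
      by_cases hm : t ∈ all
      · rw [pv_goA_mem_all _ _ _ _ hm, pv_goA_mem_all _ _ _ _ hm]
      · rw [pv_goA_not_mem _ _ _ _ hm, pv_goA_not_mem _ _ _ _ hm]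
        apply ihf.2 _ _ (pv_kids_subset crs t)
        by_cases htU : t ∈ pvUniv crs
        · have hlt := pv_pot_strict crs all t htU hm
          unfold pvDA at h; simp [htU, hm] at h; omega
        · have hle : pvPot crs (all ++ [t]) ≤ pvPot crs all :=
            pv_pot_mono crs all (all ++ [t]) (fun x hx => List.mem_append_left _ hx)
          unfold pvDA at h; simp [htU] at h; omega
    refine ⟨hSA, ?_⟩
    intro cs all hcs h
    induction cs generalizing all with
    | nil => rw [pv_loopA_nil, pv_loopA_nil]
    | cons c rest ih =>
      rw [pv_loopA_cons, pv_loopA_cons]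
      by_cases hm : c ∈ all
      · rw [if_pos hm, if_pos hm]
        exact ih all (fun x hx => hcs x (List.mem_cons_of_mem c hx)) h
      · rw [if_neg hm, if_neg hm]
        have hcU : c ∈ pvUniv crs := hcs c List.mem_cons_self
        have heq : pvGoA crs (f + 1) c all = pvGoA crs (f + 2) c all := by
          apply hSA
          unfold pvDA; simp [hcU, hm]; omega
        rw [← heq]
        have hsub : ∀ x ∈ all, x ∈ pvGoA crs (f + 1) c all :=
          fun x hx => (pv_memA crs (f + 1)).1 c all x hx
        exact ih _ (fun x hx => hcs x (List.mem_cons_of_mem c hx))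
          (le_trans (pv_pot_mono crs all _ hsub) h)

lemma pv_multiA (crs : List (String × List String)) (f k : Nat) (t : String) (all : List String)
    (h : pvPot crs all + pvDA crs t all ≤ f) :
    pvGoA crs f t all = pvGoA crs (f + k) t all := by
  induction k with
  | zero => rfl
  | succ k ih => rw [Nat.add_succ, ih, (pv_stepA crs (f + k)).1 t all (by omega)]

lemma pv_irrA (crs : List (String × List String)) (f₁ f₂ : Nat) (t : String) (all : List String)
    (h₁ : pvPot crs all + pvDA crs t all ≤ f₁) (h₂ : pvPot crs all + pvDA crs t all ≤ f₂) :
    pvGoA crs f₁ t all = pvGoA crs f₂ t all := by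
  rcases Nat.le_total f₁ f₂ with h | h
  · rw [pv_multiA crs f₁ (f₂ - f₁) t all h₁, Nat.add_sub_cancel' h]
  · rw [pv_multiA crs f₂ (f₁ - f₂) t all h₂, Nat.add_sub_cancel' h]

lemma pv_multiL (crs : List (String × List String)) (f k : Nat) (cs : List String)
    (all : List String) (hcs : ∀ c ∈ cs, c ∈ pvUniv crs) (h : pvPot crs all ≤ f) :
    pvLoopA crs f cs all = pvLoopA crs (f + k) cs all := by
  induction k with
  | zero => rfl
  | succ k ih => rw [Nat.add_succ, ih, (pv_stepA crs (f + k)).2 cs all hcs (by omega)]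

lemma pv_irrL (crs : List (String × List String)) (f₁ f₂ : Nat) (cs : List String)
    (all : List String) (hcs : ∀ c ∈ cs, c ∈ pvUniv crs)
    (h₁ : pvPot crs all ≤ f₁) (h₂ : pvPot crs all ≤ f₂) :
    pvLoopA crs f₁ cs all = pvLoopA crs f₂ cs all := by
  rcases Nat.le_total f₁ f₂ with h | h
  · rw [pv_multiL crs f₁ (f₂ - f₁) cs all hcs h₁, Nat.add_sub_cancel' h]
  · rw [pv_multiL crs f₂ (f₁ - f₂) cs all hcs h₂, Nat.add_sub_cancel' h]

def pvSc (crs : List (String × List String)) (stack : List String) : Nat :=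
  (stack.filter (fun s => !((pvUniv crs).contains s))).length

lemma pv_goB_nil (crs : List (String × List String)) (fuel : Nat) (all : List String) :
    pvGoB crs fuel [] all = all := by rw [pvGoB]

lemma pv_goB_mem (crs : List (String × List String)) (fuel : Nat) (node : String)
    (rest all : List String) (h : node ∈ all) :
    pvGoB crs fuel (node :: rest) all = pvGoB crs fuel rest all := by
  rw [pvGoB.eq_def]
  simp only [(PySem.Set.contains_iff (s := all) (x := node)).mpr h, if_true]

lemma pv_goB_not_mem (crs : List (String × List String)) (f : Nat) (node : String)
    (rest all : List String) (h : node ∉ all) :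
    pvGoB crs (f + 1) (node :: rest) all
      = pvGoB crs f (((PySem.Dict.mk crs).getD node []) ++ rest) (all ++ [node]) := by
  rw [pvGoB]
  simp only [pv_contains_false all node h, Bool.false_eq_true, if_false,
    PySem.Set.add_of_not_mem h]

lemma pv_sc_cons_mem (crs : List (String × List String)) (t : String) (stack : List String)
    (h : t ∈ pvUniv crs) : pvSc crs (t :: stack) = pvSc crs stack := by
  unfold pvSc
  rw [List.filter_cons]
  simp [h]

lemma pv_sc_cons_not_mem (crs : List (String × List String)) (t : String) (stack : List String)
    (h : t ∉ pvUniv crs) : pvSc crs (t :: stack) = pvSc crs stack + 1 := by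
  unfold pvSc
  rw [List.filter_cons]
  simp [h]

lemma pv_sc_append_sub (crs : List (String × List String)) (cs stack : List String)
    (h : ∀ c ∈ cs, c ∈ pvUniv crs) : pvSc crs (cs ++ stack) = pvSc crs stack := by
  unfold pvSc
  rw [List.filter_append]
  have : cs.filter (fun s => !((pvUniv crs).contains s)) = [] := by
    rw [List.filter_eq_nil_iff]
    intro a ha; simp [h a ha]
  rw [this, List.nil_append]

lemma pv_stepB (crs : List (String × List String)) :
    ∀ fuel stack all, pvPot crs all + pvSc crs stack ≤ fuel →
      pvGoB crs fuel stack all = pvGoB crs (fuel + 1) stack all := by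
  intro fuel
  induction fuel using Nat.strong_induction_on with
  | _ fuel ihf =>
    intro stack all h
    induction stack generalizing all with
    | nil => rw [pv_goB_nil, pv_goB_nil]
    | cons node rest ih =>
      by_cases hm : node ∈ all
      · rw [pv_goB_mem _ _ _ _ _ hm, pv_goB_mem _ _ _ _ _ hm]
        apply ih
        by_cases hU : node ∈ pvUniv crs
        · rw [pv_sc_cons_mem crs node rest hU] at h; omega
        · rw [pv_sc_cons_not_mem crs node rest hU] at h; omega
      · -- node is expanded: fuel must be positive
        have hfpos : 1 ≤ fuel := by
          by_cases hU : node ∈ pvUniv crs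
          · have := pv_pot_pos crs all node hU hm; omega
          · rw [pv_sc_cons_not_mem crs node rest hU] at h; omega
        obtain ⟨f, rfl⟩ : ∃ f, fuel = f + 1 := ⟨fuel - 1, by omega⟩
        rw [pv_goB_not_mem _ _ _ _ _ hm, pv_goB_not_mem _ _ _ _ _ hm]
        apply ihf f (by omega)
        have hkids := pv_kids_subset crs node
        rw [pv_sc_append_sub crs _ rest hkids]
        by_cases hU : node ∈ pvUniv crs
        · have hlt := pv_pot_strict crs all node hU hm
          rw [pv_sc_cons_mem crs node rest hU] at h; omega
        · have hle : pvPot crs (all ++ [node]) ≤ pvPot crs all :=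
            pv_pot_mono crs all _ (fun x hx => List.mem_append_left _ hx)
          rw [pv_sc_cons_not_mem crs node rest hU] at h; omega

lemma pv_multiB (crs : List (String × List String)) (f k : Nat) (stack all : List String)
    (h : pvPot crs all + pvSc crs stack ≤ f) :
    pvGoB crs f stack all = pvGoB crs (f + k) stack all := by
  induction k with
  | zero => rfl
  | succ k ih => rw [Nat.add_succ, ih, pv_stepB crs (f + k) stack all (by omega)]

lemma pv_irrB (crs : List (String × List String)) (f₁ f₂ : Nat) (stack all : List String)
    (h₁ : pvPot crs all + pvSc crs stack ≤ f₁) (h₂ : pvPot crs all + pvSc crs stack ≤ f₂) :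
    pvGoB crs f₁ stack all = pvGoB crs f₂ stack all := by
  rcases Nat.le_total f₁ f₂ with h | h
  · rw [pv_multiB crs f₁ (f₂ - f₁) stack all h₁, Nat.add_sub_cancel' h]
  · rw [pv_multiB crs f₂ (f₁ - f₂) stack all h₂, Nat.add_sub_cancel' h]

lemma pv_bridge (crs : List (String × List String)) :
    ∀ n t stack all, 2 * pvPot crs all + (if t ∈ pvUniv crs then 0 else 1) ≤ n →
      pvGoB crs (pvPot crs all + pvSc crs (t :: stack)) (t :: stack) all
        = pvGoB crs (pvPot crs (pvGoA crs (pvPot crs all + 1) t all) + pvSc crs stack) stack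
            (pvGoA crs (pvPot crs all + 1) t all) := by
  intro n
  induction n using Nat.strong_induction_on with
  | _ n IH =>
    intro t stack all hn
    by_cases hm : t ∈ all
    · rw [pv_goA_mem_all _ _ _ _ hm, pv_goB_mem _ _ _ _ _ hm]
      apply pv_irrB
      · by_cases htU : t ∈ pvUniv crs
        · rw [pv_sc_cons_mem crs t stack htU]
        · rw [pv_sc_cons_not_mem crs t stack htU]; omega
      · rfl
    · -- t is expanded
      have LB : ∀ cs, (∀ c ∈ cs, c ∈ pvUniv crs) → ∀ acc, 2 * pvPot crs acc + 1 ≤ n →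
          pvGoB crs (pvPot crs acc + pvSc crs (cs ++ stack)) (cs ++ stack) acc
            = pvGoB crs (pvPot crs (pvLoopA crs (pvPot crs acc) cs acc) + pvSc crs stack) stack
                (pvLoopA crs (pvPot crs acc) cs acc) := by
        intro cs
        induction cs with
        | nil =>
          intro _ acc _
          rw [List.nil_append, pv_loopA_nil]
        | cons c rest ihc =>
          intro hcs acc hacc
          have hcU : c ∈ pvUniv crs := hcs c List.mem_cons_self
          have hrest : ∀ x ∈ rest, x ∈ pvUniv crs :=
            fun x hx => hcs x (List.mem_cons_of_mem c hx)
          by_cases hcm : c ∈ acc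
          · rw [pv_loopA_cons, if_pos hcm, List.cons_append,
              pv_goB_mem _ _ _ _ _ hcm, pv_sc_cons_mem crs c _ hcU]
            exact ihc hrest acc hacc
          · -- step 1: the bridge IH for popping c
            have hb := IH (n - 1) (by omega) c (rest ++ stack) acc
              (by simp only [hcU, if_true]; omega)
            rw [List.cons_append] at *
            set acc' := pvGoA crs (pvPot crs acc + 1) c acc with hacc'
            have hsub : ∀ x ∈ acc, x ∈ acc' := fun x hx => (pv_memA crs _).1 c acc x hx
            have hple : pvPot crs acc' ≤ pvPot crs acc := pv_pot_mono crs acc acc' hsub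
            -- step 2: LB on the rest
            have hstep2 := ihc hrest acc' (by omega)
            -- step 3: identify A's loop state
            have hacc1 : pvLoopA crs (pvPot crs acc) (c :: rest) acc
                = pvLoopA crs (pvPot crs acc') rest acc' := by
              rw [pv_loopA_cons, if_neg hcm]
              have : pvGoA crs (pvPot crs acc) c acc = acc' := by
                rw [hacc']
                apply pv_irrA <;> · unfold pvDA; simp [hcU, hcm]
              rw [this]
              exact pv_irrL crs _ _ rest acc' hrest hple (le_refl _)
            rw [hacc1, hb, hstep2]
      have hfA : pvGoA crs (pvPot crs all + 1) t all
          = pvLoopA crs (pvPot crs all) ((PySem.Dict.mk crs).getD t []) (all ++ [t]) :=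
        pv_goA_not_mem crs (pvPot crs all) t all hm
      have hkids := pv_kids_subset crs t
      have hple0 : pvPot crs (all ++ [t]) ≤ pvPot crs all :=
        pv_pot_mono crs all _ (fun x hx => List.mem_append_left _ hx)
      -- unfold B's expansion of t (fuel is positive in both cases)
      have hexp : pvGoB crs (pvPot crs all + pvSc crs (t :: stack)) (t :: stack) all
          = pvGoB crs (pvPot crs (all ++ [t]) + pvSc crs (((PySem.Dict.mk crs).getD t []) ++ stack))
              (((PySem.Dict.mk crs).getD t []) ++ stack) (all ++ [t]) := by
        by_cases htU : t ∈ pvUniv crs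
        · have hpos := pv_pot_pos crs all t htU hm
          have hlt := pv_pot_strict crs all t htU hm
          rw [pv_sc_cons_mem crs t stack htU]
          obtain ⟨f, hf⟩ : ∃ f, pvPot crs all + pvSc crs stack = f + 1 :=
            ⟨pvPot crs all + pvSc crs stack - 1, by omega⟩
          rw [hf, pv_goB_not_mem _ _ _ _ _ hm]
          apply pv_irrB
          · rw [pv_sc_append_sub crs _ stack hkids]; omega
          · rfl
        · rw [pv_sc_cons_not_mem crs t stack htU,
            show pvPot crs all + (pvSc crs stack + 1) = (pvPot crs all + pvSc crs stack) + 1 from by omega,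
            pv_goB_not_mem _ _ _ _ _ hm]
          apply pv_irrB
          · rw [pv_sc_append_sub crs _ stack hkids]; omega
          · rfl
      rw [hexp, hfA]
      have hmeas : 2 * pvPot crs (all ++ [t]) + 1 ≤ n := by
        by_cases htU : t ∈ pvUniv crs
        · have := pv_pot_strict crs all t htU hm
          simp only [htU, if_true] at hn; omega
        · simp only [htU, if_false] at hn; omega
      rw [LB _ hkids (all ++ [t]) hmeas]
      have : pvLoopA crs (pvPot crs (all ++ [t])) ((PySem.Dict.mk crs).getD t []) (all ++ [t])
          = pvLoopA crs (pvPot crs all) ((PySem.Dict.mk crs).getD t []) (all ++ [t]) :=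
        pv_irrL crs _ _ _ _ hkids (le_refl _) hple0
      rw [this]

lemma pv_dA_le (crs : List (String × List String)) (t : String) (all : List String) :
    pvDA crs t all ≤ 1 := by unfold pvDA; split <;> omega

lemma pv_sc_singleton_le (crs : List (String × List String)) (t : String) :
    pvSc crs [t] ≤ 1 := by
  have := List.length_filter_le (fun s => !((pvUniv crs).contains s)) [t]
  simpa [pvSc] using this

-- ===== VERDICT (by name: the statement is the Claim_ definition above) =====
theorem contained_resources_spec : Claim_equal_contained_resources := by
  intro t crs all _
  unfold Spec_contained_resources contained_resources contained_resources_alt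
  have hpot : pvPot crs all ≤ (crs.flatMap Prod.snd).length := pv_pot_le crs all
  have hdA := pv_dA_le crs t all
  have hsc := pv_sc_singleton_le crs t
  have hA : pvGoA crs (2 + (crs.flatMap Prod.snd).length) t all
      = pvGoA crs (pvPot crs all + 1) t all :=
    pv_irrA crs _ _ t all (by omega) (by omega)
  have hB : pvGoB crs (2 + (crs.flatMap Prod.snd).length) [t] all
      = pvGoB crs (pvPot crs all + pvSc crs [t]) [t] all :=
    pv_irrB crs _ _ [t] all (by omega) (by omega)
  have hbr := pv_bridge crs (2 * pvPot crs all + 1) t [] all (by split <;> omega)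
  rw [hA, hB, hbr, show pvSc crs ([] : List String) = 0 from rfl, pv_goB_nil]
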